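-- pv_equiv track=rewrite | github.com/dmarek03/ALGORITHM_AND_DATA_STRUCTURE | extra_exams/egzP5a_inwestor.py | get_min_area
-- ===== SOURCE A (Python) =====
-- def get_min_area(tab: list[int], dp: list[list[int]], a: int, b: int) -> int:
--     if a == b:
--         dp[a][b] = tab[a]
--         return tab[a]
--
--     if dp[a][b] != -1:
--         return dp[a][b]
--     dp[a][b] = min(get_min_area(tab, dp, a, b-1), tab[b])
--     return dp[a][b]
-- ===== SOURCE B (Python) =====
-- def get_min_area(tab: list[int], dp: list[list[int]], a: int, b: int) -> int:
--     # Iterative bottom-up pass over the same dp row instead of top-down recursion.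
--     # Walk back from b to the first memoized cell (or to a), then extend forward with min.
--     k = b
--     while k > a and dp[a][k] == -1:
--         k -= 1
--     if k == a:
--         result = tab[a]
--         dp[a][a] = tab[a]
--     else:
--         result = dp[a][k]
--     for j in range(k + 1, b + 1):
--         result = min(result, tab[j])
--         dp[a][j] = result
--     return result
-- ===== Notes on version B (the rewrite author's own statement) =====
-- stated objective: idiomatic
-- what changed: Replaces A's top-down memoized recursion with an iterative pass: walk back from b to the first memoized dp cell (or to a), then extend forward with a running minimum, writing the same dp cells.
-- outside the precondition, e.g. on get_min_area([5, 6], [[0, 0], [-1, 7]], 1, 0): A returns 5, B returns -1; on get_min_area([5, 6], [[-1, -1]], 1, 0): A raises IndexError, B raises IndexError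
import Mathlib
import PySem

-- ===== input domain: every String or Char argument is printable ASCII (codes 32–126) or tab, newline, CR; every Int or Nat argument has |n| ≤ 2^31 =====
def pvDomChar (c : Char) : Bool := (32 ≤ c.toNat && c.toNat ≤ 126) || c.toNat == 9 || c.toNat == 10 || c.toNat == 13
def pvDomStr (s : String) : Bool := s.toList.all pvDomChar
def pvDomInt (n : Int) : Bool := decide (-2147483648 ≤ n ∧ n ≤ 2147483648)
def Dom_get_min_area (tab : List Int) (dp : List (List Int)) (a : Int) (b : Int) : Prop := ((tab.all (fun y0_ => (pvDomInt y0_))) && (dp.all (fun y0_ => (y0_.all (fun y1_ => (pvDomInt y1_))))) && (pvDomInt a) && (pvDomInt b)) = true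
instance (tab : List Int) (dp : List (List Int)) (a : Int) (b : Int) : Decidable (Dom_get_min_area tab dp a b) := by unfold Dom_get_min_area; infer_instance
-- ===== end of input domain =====

-- B replaces A's top-down memoized recursion by an iterative pass: walk back to the first
-- memoized cell (or to a), then extend forward with running minima. Equivalence is about the
-- RETURN value; both Pythons mutate dp (B writes the same cells the same values as A).

-- ===== PORT A =====
-- top-down recursion of A, fuel = b - a (exactly enough on Pre_; fuel 0 with a ≠ b is
-- where Python A would recurse below a, which Pre_ excludes)
def pvAgo (tab : List Int) (dp : List (List Int)) (a : Int) : Nat → Int → Int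
  | fuel, b =>
    if a = b then (PySem.List.pyGet? tab a).getD 0
    else if (PySem.List.pyGet? ((PySem.List.pyGet? dp a).getD []) b).getD 0 ≠ -1 then
      (PySem.List.pyGet? ((PySem.List.pyGet? dp a).getD []) b).getD 0
    else
      match fuel with
      | 0 => 0
      | f + 1 => min (pvAgo tab dp a f (b - 1)) ((PySem.List.pyGet? tab b).getD 0)

def get_min_area (tab : List Int) (dp : List (List Int)) (a : Int) (b : Int) : Int :=
  pvAgo tab dp a (b - a).toNat b

-- ===== PORT B =====
-- the while loop of B: k walks down from b while k > a and dp[a][k] == -1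
def pvFindK (row : List Int) (a : Int) : Nat → Int → Int
  | 0, k => k
  | f + 1, k =>
    if a < k ∧ (PySem.List.pyGet? row k).getD 0 = -1 then pvFindK row a f (k - 1) else k

def get_min_area_alt (tab : List Int) (dp : List (List Int)) (a : Int) (b : Int) : Int :=
  let row := (PySem.List.pyGet? dp a).getD []
  let k := pvFindK row a (b - a).toNat b
  let base := if k = a then (PySem.List.pyGet? tab a).getD 0 else (PySem.List.pyGet? row k).getD 0
  (PySem.List.pyRange (k + 1) (b + 1) 1).foldl
    (fun r j => min r ((PySem.List.pyGet? tab j).getD 0)) base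

-- ===== PRECONDITION & SPEC =====
-- Pre_ admits the inputs on which Python A returns: a valid row index a and then either a == b
-- (A returns tab[a]), or an immediate memo hit dp[a][b] != -1 (both with Python's negative-index
-- wraparound allowed), or a forward interval 0 <= a <= b with all indices in range. It excludes
-- inputs where A raises IndexError or recurses without bound, and the degenerate backwards
-- intervals a > b with dp[a][b] == -1 on which a return by A is an accident of negative-index
-- wraparound inside the empty interval (see cites).
def Pre_get_min_area (tab : List Int) (dp : List (List Int)) (a : Int) (b : Int) : Prop :=
  (-(dp.length : Int) ≤ a ∧ a < (dp.length : Int)) ∧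
  ((a = b ∧ -(tab.length : Int) ≤ a ∧ a < (tab.length : Int) ∧
      -((((PySem.List.pyGet? dp a).getD []).length : Int)) ≤ b ∧
      b < ((((PySem.List.pyGet? dp a).getD []).length : Int))) ∨
   (¬ a = b ∧ -((((PySem.List.pyGet? dp a).getD []).length : Int)) ≤ b ∧
      b < ((((PySem.List.pyGet? dp a).getD []).length : Int)) ∧
      (PySem.List.pyGet? ((PySem.List.pyGet? dp a).getD []) b).getD 0 ≠ -1) ∨
   (0 ≤ a ∧ a ≤ b ∧ b < (tab.length : Int) ∧
      b < ((((PySem.List.pyGet? dp a).getD []).length : Int))))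
instance (tab : List Int) (dp : List (List Int)) (a : Int) (b : Int) : Decidable (Pre_get_min_area tab dp a b) := by unfold Pre_get_min_area; infer_instance

def pvWitness_get_min_area : List Int × List (List Int) × Int × Int := ([3, 1, 2], [[-1, -1, -1], [-1, -1, -1], [-1, -1, -1]], 0, 2)

def Spec_get_min_area (tab : List Int) (dp : List (List Int)) (a : Int) (b : Int) (out : Int) : Prop := out = get_min_area_alt tab dp a b
instance (tab : List Int) (dp : List (List Int)) (a : Int) (b : Int) (out : Int) : Decidable (Spec_get_min_area tab dp a b out) := by unfold Spec_get_min_area; infer_instance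

-- ===== CLAIM (what is proved, stated in full; the proofs are below) =====
def Claim_equal_get_min_area : Prop := ∀ (tab : List Int) (dp : List (List Int)) (a : Int) (b : Int), Dom_get_min_area tab dp a b → Pre_get_min_area tab dp a b → Spec_get_min_area tab dp a b (get_min_area tab dp a b)

-- ===== LEMMAS AND PROOFS =====

theorem pvFindK_le (row : List Int) (a : Int) : ∀ (f : Nat) (k : Int), pvFindK row a f k ≤ k := by
  intro f
  induction f with
  | zero => intro k; simp [pvFindK]
  | succ f ih =>
    intro k
    simp only [pvFindK]
    split
    · exact le_trans (ih (k - 1)) (by omega)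
    · exact le_refl k

theorem pv_key (tab : List Int) (dp : List (List Int)) (a : Int) :
    ∀ (n : Nat) (b : Int), b = a + n →
      pvAgo tab dp a n b =
        (PySem.List.pyRange (pvFindK ((PySem.List.pyGet? dp a).getD []) a n b + 1) (b + 1) 1).foldl
          (fun r j => min r ((PySem.List.pyGet? tab j).getD 0))
          (if pvFindK ((PySem.List.pyGet? dp a).getD []) a n b = a
            then (PySem.List.pyGet? tab a).getD 0
            else (PySem.List.pyGet? ((PySem.List.pyGet? dp a).getD []) (pvFindK ((PySem.List.pyGet? dp a).getD []) a n b)).getD 0) := by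
  intro n
  induction n with
  | zero =>
    intro b hb
    have hba : b = a := by omega
    subst hba
    simp [pvAgo, pvFindK, PySem.List.pyRange_one_eq_nil (by omega : b + 1 ≤ b + 1)]
  | succ f ih =>
    intro b hb
    have hab : a < b := by omega
    have hane : ¬ a = b := by omega
    by_cases hmemo : (PySem.List.pyGet? ((PySem.List.pyGet? dp a).getD []) b).getD 0 = -1
    · -- recurse
      have hA : pvAgo tab dp a (f + 1) b
          = min (pvAgo tab dp a f (b - 1)) ((PySem.List.pyGet? tab b).getD 0) := by
        simp [pvAgo, hane, hmemo]
      have hK : pvFindK ((PySem.List.pyGet? dp a).getD []) a (f + 1) b = pvFindK ((PySem.List.pyGet? dp a).getD []) a f (b - 1) := by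
        simp [pvFindK, hab, hmemo]
      have hkle : pvFindK ((PySem.List.pyGet? dp a).getD []) a f (b - 1) ≤ b - 1 := pvFindK_le ((PySem.List.pyGet? dp a).getD []) a f (b - 1)
      have hrange : PySem.List.pyRange (pvFindK ((PySem.List.pyGet? dp a).getD []) a f (b - 1) + 1) (b + 1) 1
          = PySem.List.pyRange (pvFindK ((PySem.List.pyGet? dp a).getD []) a f (b - 1) + 1) b 1 ++ [b] :=
        PySem.List.pyRange_one_succ_right (by omega)
      rw [hA, hK, hrange, List.foldl_append]
      rw [ih (b - 1) (by omega)]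
      simp
    · -- memo hit at b itself
      have hK : pvFindK ((PySem.List.pyGet? dp a).getD []) a (f + 1) b = b := by
        simp [pvFindK, hmemo]
      rw [hK]
      simp [pvAgo, hane, hmemo, Ne.symm hane,
        PySem.List.pyRange_one_eq_nil (by omega : b + 1 ≤ b + 1)]

theorem pv_ab (tab : List Int) (dp : List (List Int)) (a : Int) :
    get_min_area tab dp a a = get_min_area_alt tab dp a a := by
  simp [get_min_area, get_min_area_alt, pvAgo, pvFindK,
    PySem.List.pyRange_one_eq_nil (le_refl (a + 1))]

theorem pv_memo (tab : List Int) (dp : List (List Int)) (a b : Int) (hne : ¬ a = b)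
    (hm : (PySem.List.pyGet? ((PySem.List.pyGet? dp a).getD []) b).getD 0 ≠ -1) :
    get_min_area tab dp a b = get_min_area_alt tab dp a b := by
  have hK : ∀ f : Nat, pvFindK ((PySem.List.pyGet? dp a).getD []) a f b = b := by
    intro f; cases f <;> simp [pvFindK, hm]
  unfold get_min_area get_min_area_alt
  cases (b - a).toNat <;>
    simp [pvAgo, hne, hm, hK, Ne.symm hne, PySem.List.pyRange_one_eq_nil (le_refl (b + 1))]

-- ===== VERDICT (by name: the statement is the Claim_ definition above) =====
theorem get_min_area_spec : Claim_equal_get_min_area := by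
  intro tab dp a b _hdom hpre
  unfold Spec_get_min_area
  obtain ⟨_, hcase⟩ := hpre
  rcases hcase with ⟨hab, _⟩ | ⟨hne, _, _, hm⟩ | ⟨_, hab, _, _⟩
  · subst hab; exact pv_ab tab dp a
  · exact pv_memo tab dp a b hne hm
  · unfold get_min_area get_min_area_alt
    exact pv_key tab dp a (b - a).toNat b (by omega)
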